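-- pv_equiv track=rewrite | github.com/ziyishen09-glitch/DRL-Optical-Network | plotter_saved_resource.py | build_load_axis
-- ===== SOURCE A (Python) =====
-- def build_load_axis(
--     load_min: int, load_step: int, ncols: int, load_max: int | None = None
-- ) -> list[int]:
--     if load_step <= 0:
--         raise ValueError("load_step must be positive")
--     loads = [load_min + i * load_step for i in range(ncols)]
--     if load_max is not None and loads and loads[-1] > load_max:
--         loads = [value for value in loads if value <= load_max]
--     return loads
-- ===== SOURCE B (Python) =====
-- def build_load_axis(
--     load_min: int, load_step: int, ncols: int, load_max: int | None = None
-- ) -> list[int]: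
--     if load_step <= 0:
--         raise ValueError("load_step must be positive")
--     if load_max is None:
--         count = ncols
--     else:
--         count = min(ncols, (load_max - load_min) // load_step + 1)
--     return [load_min + i * load_step for i in range(count)]
-- ===== Notes on version B (the rewrite author's own statement) =====
-- stated objective: faster
-- what changed: Instead of building the full ncols-element list and then filtering it in a second pass when the last element exceeds load_max, B computes the number of valid elements arithmetically by floor division and builds only that prefix in a single pass.
import Mathlib
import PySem

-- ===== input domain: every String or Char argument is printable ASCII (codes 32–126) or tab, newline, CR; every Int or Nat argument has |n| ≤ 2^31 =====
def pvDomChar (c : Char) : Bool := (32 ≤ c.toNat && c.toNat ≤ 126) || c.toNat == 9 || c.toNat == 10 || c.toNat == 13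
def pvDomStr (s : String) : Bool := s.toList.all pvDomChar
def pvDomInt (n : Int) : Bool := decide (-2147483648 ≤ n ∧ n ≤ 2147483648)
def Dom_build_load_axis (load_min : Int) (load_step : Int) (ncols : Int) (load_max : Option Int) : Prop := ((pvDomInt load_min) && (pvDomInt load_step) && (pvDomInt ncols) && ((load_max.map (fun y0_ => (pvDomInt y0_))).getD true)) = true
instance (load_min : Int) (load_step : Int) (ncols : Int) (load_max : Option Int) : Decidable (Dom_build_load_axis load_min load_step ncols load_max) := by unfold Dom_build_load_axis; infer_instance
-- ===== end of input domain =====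

-- B replaces A's build-then-filter second pass by computing the cutoff count arithmetically
-- (floor division) and building the sequence in a single pass; return-value equivalence on load_step > 0.

-- ===== PORT A =====
def build_load_axis (load_min : Int) (load_step : Int) (ncols : Int) (load_max : Option Int) : List Int :=
  let loads := (PySem.List.pyRange 0 ncols 1).map (fun i => load_min + i * load_step)
  match load_max with
  | none => loads
  | some m =>
    match loads.getLast? with
    | none => loads
    | some last => if m < last then loads.filter (fun v => decide (v ≤ m)) else loads

-- ===== PORT B =====
def build_load_axis_alt (load_min : Int) (load_step : Int) (ncols : Int) (load_max : Option Int) : List Int :=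
  let count := match load_max with
    | none => ncols
    | some m => min ncols (PySem.Int.floordiv (m - load_min) load_step + 1)
  (PySem.List.pyRange 0 count 1).map (fun i => load_min + i * load_step)

-- ===== PRECONDITION & SPEC =====
-- Python A raises ValueError when load_step ≤ 0; exactly those inputs are excluded.
def Pre_build_load_axis (load_min : Int) (load_step : Int) (ncols : Int) (load_max : Option Int) : Prop := 0 < load_step
instance (load_min : Int) (load_step : Int) (ncols : Int) (load_max : Option Int) : Decidable (Pre_build_load_axis load_min load_step ncols load_max) := by unfold Pre_build_load_axis; infer_instance

def pvWitness_build_load_axis : Int × Int × Int × Option Int := (0, 5, 4, some 12)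

def Spec_build_load_axis (load_min : Int) (load_step : Int) (ncols : Int) (load_max : Option Int) (out : List Int) : Prop := out = build_load_axis_alt load_min load_step ncols load_max
instance (load_min : Int) (load_step : Int) (ncols : Int) (load_max : Option Int) (out : List Int) : Decidable (Spec_build_load_axis load_min load_step ncols load_max out) := by unfold Spec_build_load_axis; infer_instance

-- ===== CLAIM (what is proved, stated in full; the proofs are below) =====
def Claim_equal_build_load_axis : Prop := ∀ (load_min : Int) (load_step : Int) (ncols : Int) (load_max : Option Int), Dom_build_load_axis load_min load_step ncols load_max → Pre_build_load_axis load_min load_step ncols load_max → Spec_build_load_axis load_min load_step ncols load_max (build_load_axis load_min load_step ncols load_max)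

-- ===== LEMMAS AND PROOFS =====

-- Filtering an increasing range at ≤ q is the same as truncating it at q+1.
lemma filter_pyRange_le (n q : Int) :
    (PySem.List.pyRange 0 n 1).filter (fun i => decide (i ≤ q)) =
    PySem.List.pyRange 0 (min n (q + 1)) 1 := by
  by_cases hn : n ≤ 0
  · rw [PySem.List.pyRange_one_eq_nil (by omega), PySem.List.pyRange_one_eq_nil (by omega)]
    rfl
  · by_cases hq : q + 1 ≤ 0
    · rw [PySem.List.pyRange_one_eq_nil (show min n (q + 1) ≤ 0 by omega)]
      refine List.filter_eq_nil_iff.2 ?_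
      intro i hi
      have h := PySem.List.mem_pyRange_one.1 hi
      simp only [decide_eq_true_eq]
      omega
    · have h1 : (PySem.List.pyRange 0 (min n (q + 1)) 1).filter (fun i => decide (i ≤ q)) =
          PySem.List.pyRange 0 (min n (q + 1)) 1 := by
        refine List.filter_eq_self.2 ?_
        intro i hi
        have h := PySem.List.mem_pyRange_one.1 hi
        simp only [decide_eq_true_eq]
        omega
      have h2 : (PySem.List.pyRange (min n (q + 1)) n 1).filter (fun i => decide (i ≤ q)) = [] := by
        by_cases h : n ≤ q + 1
        · rw [show min n (q + 1) = n by omega, PySem.List.pyRange_one_eq_nil le_rfl]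
          rfl
        · refine List.filter_eq_nil_iff.2 ?_
          intro i hi
          have hm := PySem.List.mem_pyRange_one.1 hi
          simp only [decide_eq_true_eq]
          omega
      rw [PySem.List.pyRange_one_append 0 (min n (q + 1)) n (by omega) (by omega),
        List.filter_append, h1, h2, List.append_nil]

-- ===== VERDICT (by name: the statement is the Claim_ definition above) =====
theorem build_load_axis_spec : Claim_equal_build_load_axis := by
  intro a s n mo _ hs
  unfold Spec_build_load_axis build_load_axis build_load_axis_alt
  cases mo with
  | none => rfl
  | some m =>
    dsimp only
    set q : Int := PySem.Int.floordiv (m - a) s with hq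
    have hiff : ∀ i : Int, (a + i * s ≤ m) ↔ (i ≤ q) := by
      intro i
      rw [hq, PySem.Int.le_floordiv_iff_mul_le hs]
      omega
    by_cases hn : n ≤ 0
    · rw [PySem.List.pyRange_one_eq_nil (by omega),
        PySem.List.pyRange_one_eq_nil (show min n (q + 1) ≤ 0 by omega)]
      rfl
    · have hsplit : PySem.List.pyRange 0 n 1 = PySem.List.pyRange 0 (n - 1) 1 ++ [n - 1] := by
        have h := PySem.List.pyRange_one_succ_right (a := 0) (b := n - 1) (by omega)
        rwa [show n - 1 + 1 = n by omega] at h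
      rw [hsplit, List.map_append, List.map_singleton, List.getLast?_concat]
      dsimp only
      by_cases hlast : m < a + (n - 1) * s
      · rw [if_pos hlast, ← List.map_singleton (f := fun i => a + i * s) (a := n - 1), ← List.map_append,
          ← hsplit, List.filter_map]
        have hfun : ((fun v => decide (v ≤ m)) ∘ (fun i => a + i * s)) =
            (fun i => decide (i ≤ q)) := by
          funext i
          simp only [Function.comp, decide_eq_decide]
          exact hiff i
        rw [hfun, filter_pyRange_le]
      · rw [if_neg hlast, ← List.map_singleton (f := fun i => a + i * s) (a := n - 1), ← List.map_append,
          ← hsplit]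
        have : min n (q + 1) = n := by
          have := (hiff (n - 1)).1 (by omega)
          omega
        rw [this]
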